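-- pv_equiv track=rewrite | github.com/Kazhuu/movelister | pythonpath/movelister/sheet/helper.py | stripTrailingEmptyRows
-- ===== SOURCE A (Python) =====
-- def stripTrailingEmptyRows(data):
--     """
--     This code is used when instantiating certain classes and the code reads from sheet.
--     """
--     endIndex = len(data)
--     for index, row in reversed(list(enumerate(data))):
--         text = str(''.join(row))
--         if text == '':
--             endIndex = endIndex - 1
--         else:
--             break
--     return data[:endIndex]
-- ===== SOURCE B (Python) =====
-- def stripTrailingEmptyRows(data):
--     last = 0
--     for i, row in enumerate(data):
--         if ''.join(row) != '':
--             last = i + 1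
--     return data[:last]
-- ===== Notes on version B (the rewrite author's own statement) =====
-- stated objective: alternative
-- what changed: B replaces A's reversed-enumerate scan with break and a decremented endIndex by a single forward pass that records last = i+1 at each non-empty row and returns data[:last].
import Mathlib
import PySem

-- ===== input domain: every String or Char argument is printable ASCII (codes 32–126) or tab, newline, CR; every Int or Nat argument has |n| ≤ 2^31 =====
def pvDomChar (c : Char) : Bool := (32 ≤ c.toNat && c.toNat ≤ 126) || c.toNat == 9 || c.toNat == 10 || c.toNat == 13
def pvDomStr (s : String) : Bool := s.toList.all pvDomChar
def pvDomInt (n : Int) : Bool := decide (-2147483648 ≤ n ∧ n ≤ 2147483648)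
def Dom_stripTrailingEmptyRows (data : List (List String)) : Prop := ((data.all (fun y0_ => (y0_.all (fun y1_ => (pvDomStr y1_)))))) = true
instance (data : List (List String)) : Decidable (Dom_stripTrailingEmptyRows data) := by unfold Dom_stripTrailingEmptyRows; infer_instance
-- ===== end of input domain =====

-- B strips trailing empty rows by one forward pass remembering the last non-empty index, instead of A's reversed scan with break; objective: alternative (same cost).

-- ===== PORT A =====
-- the reversed-enumerate loop: decrement endIndex while rows join to '', break at the first non-empty
def stripAloop : List (Int × List String) → Int → Int
  | [], e => e
  | (_, row) :: rest, e =>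
      if PySem.Str.join "" row = "" then stripAloop rest (e - 1) else e

def stripTrailingEmptyRows (data : List (List String)) : List (List String) :=
  PySem.List.slice data none (some (stripAloop (PySem.List.enumerate data 0).reverse (data.length : Int)))

-- ===== PORT B =====
def stripTrailingEmptyRows_alt (data : List (List String)) : List (List String) :=
  let last := (PySem.List.enumerate data 0).foldl
    (fun acc p => if PySem.Str.join "" p.2 ≠ "" then p.1 + 1 else acc) 0
  PySem.List.slice data none (some last)

-- ===== PRECONDITION & SPEC =====
def Spec_stripTrailingEmptyRows (data : List (List String)) (out : List (List String)) : Prop := out = stripTrailingEmptyRows_alt data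
instance (data : List (List String)) (out : List (List String)) : Decidable (Spec_stripTrailingEmptyRows data out) := by unfold Spec_stripTrailingEmptyRows; infer_instance

-- ===== CLAIM (what is proved, stated in full; the proofs are below) =====
def Claim_equal_stripTrailingEmptyRows : Prop := ∀ (data : List (List String)), Dom_stripTrailingEmptyRows data → Spec_stripTrailingEmptyRows data (stripTrailingEmptyRows data)

-- ===== LEMMAS AND PROOFS =====

-- the two loops compute the same cut index
theorem stripLoops_eq (data : List (List String)) :
    stripAloop (PySem.List.enumerate data 0).reverse (data.length : Int) =
    (PySem.List.enumerate data 0).foldl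
      (fun acc p => if PySem.Str.join "" p.2 ≠ "" then p.1 + 1 else acc) 0 := by
  induction data using List.reverseRecOn with
  | nil => simp [PySem.List.enumerate_nil, stripAloop]
  | append_singleton xs r ih =>
      rw [PySem.List.enumerate_append, PySem.List.enumerate_cons, PySem.List.enumerate_nil]
      rw [List.reverse_append, List.foldl_append]
      simp only [List.reverse_cons, List.reverse_nil, List.nil_append, List.cons_append,
        List.foldl_cons, List.foldl_nil, stripAloop]
      by_cases h : PySem.Str.join "" r = ""
      · simp [h, ih]
      · simp only [if_neg h, if_pos h]
        simp [List.length_append]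

-- ===== VERDICT (by name: the statement is the Claim_ definition above) =====
theorem stripTrailingEmptyRows_spec : Claim_equal_stripTrailingEmptyRows := by
  intro data _
  unfold Spec_stripTrailingEmptyRows stripTrailingEmptyRows stripTrailingEmptyRows_alt
  rw [stripLoops_eq]
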